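-- pv_equiv track=rewrite | github.com/kaluginpeter/Algorithms_and_structures_tasks | Python_Solutions/CodeWars/6kyu/Longest_Strict_Bouncy_Subarray.py | longest_bouncy_list
-- ===== SOURCE A (Python) =====
-- def longest_bouncy_list(arr):
--     l, s = [], []
--     for v in arr:
--         if not l or v!=l[-1] and (len(l)==1 or (l[-1]-l[-2]) * (l[-1]-v) > 0):
--             l.append(v)
--         else: l = l[-1:] + [v] if v != l[-1] else [v]
--         if len(l)>len(s): s = l
--     return s
-- ===== SOURCE B (Python) =====
-- def longest_bouncy_list(arr):
--     a = list(arr)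
--     n = len(a)
--     if n < 2:
--         return a[:]
--     # sign table: sgn[i] compares a[i+1] with a[i]
--     sgn = []
--     for i in range(n - 1):
--         d = a[i + 1] - a[i]
--         sgn.append(1 if d > 0 else (-1 if d < 0 else 0))
--     best_start, best_len = 0, 1
--     run_start = 0  # index into a where the current bouncy window begins
--     for k in range(n - 1):
--         if sgn[k] == 0:
--             run_start = k + 1
--         elif not (run_start == k or sgn[k] != sgn[k - 1]):
--             run_start = k
--         cur = k + 2 - run_start
--         if cur > best_len:
--             best_start, best_len = run_start, cur
--     return a[best_start:best_start + best_len]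
-- ===== Notes on version B (the rewrite author's own statement) =====
-- stated objective: alternative
-- what changed: B precomputes a -1/0/+1 sign table of adjacent differences and scans it once tracking window indices (run_start, best_start, best_len), returning a single slice at the end, instead of A's incremental building of the run and best as concrete lists with Python aliasing between them.
import Mathlib
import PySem

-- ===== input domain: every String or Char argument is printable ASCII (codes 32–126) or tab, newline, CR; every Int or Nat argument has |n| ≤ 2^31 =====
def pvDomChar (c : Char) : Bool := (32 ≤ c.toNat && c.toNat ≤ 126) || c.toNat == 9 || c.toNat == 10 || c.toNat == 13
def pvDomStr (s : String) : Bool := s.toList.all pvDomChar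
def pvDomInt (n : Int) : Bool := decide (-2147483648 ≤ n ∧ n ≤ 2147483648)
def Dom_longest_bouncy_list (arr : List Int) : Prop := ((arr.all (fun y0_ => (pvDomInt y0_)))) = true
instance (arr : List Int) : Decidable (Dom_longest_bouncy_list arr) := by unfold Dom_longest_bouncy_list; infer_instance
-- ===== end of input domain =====

-- B replaces A's incremental run/best list building (with Python aliasing between them) by a
-- precomputed sign table scanned once over indices, returning a single slice; same O(n) cost (objective: alternative).

-- ===== PORT A =====
-- Single linear scan keeping the current run `l` and the best run `s` as lists.
-- Python's `s = l` makes `s` an ALIAS of `l`, so a later `l.append(v)` grows `s` too;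
-- aliased lists are equal as values and the update guard is a strict `>`, so modelling
-- the alias by value equality (`if s = l then … `) yields the identical state (return value only).
def pvLast (l : List Int) : Int := (PySem.List.pyGet? l (-1)).getD 0   -- l[-1], guarded nonempty at use
def pvLast2 (l : List Int) : Int := (PySem.List.pyGet? l (-2)).getD 0  -- l[-2], guarded len ≥ 2 at use

def pvStepA (st : List Int × List Int) (v : Int) : List Int × List Int :=
  let l := st.1
  let s := st.2
  let p : List Int × List Int :=
    if l = [] ∨ (v ≠ pvLast l ∧ (l.length = 1 ∨ (pvLast l - pvLast2 l) * (pvLast l - v) > 0)) then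
      (l ++ [v], if s = l then l ++ [v] else s)       -- l.append(v) (grows the alias too)
    else
      (if v ≠ pvLast l then PySem.List.slice l (some (-1)) none ++ [v] else [v], s)
  if p.1.length > p.2.length then (p.1, p.1) else p

def longest_bouncy_list (arr : List Int) : List Int :=
  (arr.foldl pvStepA ([], [])).2

-- ===== PORT B =====
def pvSign (d : Int) : Int := if d > 0 then 1 else if d < 0 then -1 else 0

def pvStepB (sgn : List Int) (st : Int × Int × Int) (k : Int) : Int × Int × Int :=
  let bs := st.1
  let bl := st.2.1
  let rs := st.2.2
  let rs' :=
    if (PySem.List.pyGet? sgn k).getD 0 = 0 then k + 1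
    else if ¬ (rs = k ∨ (PySem.List.pyGet? sgn k).getD 0 ≠ (PySem.List.pyGet? sgn (k - 1)).getD 0) then k
    else rs
  let cur := k + 2 - rs'
  if cur > bl then (rs', cur, rs') else (bs, bl, rs')

def longest_bouncy_list_alt (arr : List Int) : List Int :=
  let a := arr
  let n : Int := PySem.List.len a
  if n < 2 then PySem.List.slice a none none    -- a[:]
  else
    let sgn := (PySem.List.pyRange 0 (n - 1) 1).foldl
      (fun acc i =>
        acc ++ [pvSign ((PySem.List.pyGet? a (i + 1)).getD 0 - (PySem.List.pyGet? a i).getD 0)]) []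
    let st := (PySem.List.pyRange 0 (n - 1) 1).foldl (pvStepB sgn) (0, 1, 0)
    PySem.List.slice a (some st.1) (some (st.1 + st.2.1))

-- ===== PRECONDITION & SPEC =====
def Spec_longest_bouncy_list (arr : List Int) (out : List Int) : Prop := out = longest_bouncy_list_alt arr
instance (arr : List Int) (out : List Int) : Decidable (Spec_longest_bouncy_list arr out) := by unfold Spec_longest_bouncy_list; infer_instance

-- ===== CLAIM (what is proved, stated in full; the proofs are below) =====
def Claim_equal_longest_bouncy_list : Prop := ∀ (arr : List Int), Dom_longest_bouncy_list arr → Spec_longest_bouncy_list arr (longest_bouncy_list arr)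

-- ===== LEMMAS AND PROOFS =====

-- a[i:j] as take/drop segments, the sign table as a function of the index, and the
-- coupled-loop invariant relating A's (l, s) to B's (best_start, best_len, run_start)

def sgnFn (a : List Int) (k : Nat) : Int := pvSign (a.getD (k+1) 0 - a.getD k 0)
def sgnList (a : List Int) : List Int := (List.range (a.length - 1)).map (sgnFn a)

def pvSeg (a : List Int) (i j : Nat) : List Int := (a.take j).drop i

def pvRsB (a : List Int) (t rs : Nat) : Nat :=
  if sgnFn a (t-1) = 0 then t
  else if rs = t - 1 ∨ sgnFn a (t-1) ≠ sgnFn a (t-2) then rs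
  else t - 1

def pvInv (a : List Int) (t : Nat) (l s : List Int) (bs bl rs : Nat) : Prop :=
  rs < t ∧ t ≤ a.length ∧ 1 ≤ bl ∧ bs + bl ≤ t ∧ t - rs ≤ bl ∧
  l = pvSeg a rs t ∧ s = pvSeg a bs (bs + bl) ∧
  ∀ i : Nat, rs ≤ i → i + 1 < t → sgnFn a i ≠ 0

lemma seg_len (a : List Int) (i j : Nat) (hj : j ≤ a.length) : (pvSeg a i j).length = j - i := by
  simp [pvSeg, List.length_drop, List.length_take]; omega

lemma seg_getD (a : List Int) (i j m : Nat) (h : i + m < j) (_hj : j ≤ a.length) :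
    (pvSeg a i j).getD m 0 = a.getD (i+m) 0 := by
  unfold pvSeg
  rw [List.getD_eq_getElem?_getD, List.getD_eq_getElem?_getD, List.getElem?_drop]
  rw [List.getElem?_take_of_lt (by omega)]

lemma seg_last (a : List Int) (i j : Nat) (hij : i < j) (hj : j ≤ a.length) :
    pvLast (pvSeg a i j) = a.getD (j-1) 0 := by
  unfold pvLast
  rw [PySem.List.pyGet?_neg_one, List.getLast?_eq_getElem?]
  rw [← List.getD_eq_getElem?_getD, seg_len a i j hj]
  rw [seg_getD a i j (j - i - 1) (by omega) hj]
  congr 1; omega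

lemma seg_last2 (a : List Int) (i j : Nat) (hij : i + 2 ≤ j) (hj : j ≤ a.length) :
    pvLast2 (pvSeg a i j) = a.getD (j-2) 0 := by
  unfold pvLast2
  rw [PySem.List.pyGet?_neg_ofNat _ 2 (by omega) (by rw [seg_len a i j hj]; omega)]
  rw [← List.getD_eq_getElem?_getD, seg_len a i j hj,
      seg_getD a i j (j - i - 2) (by omega) hj]
  congr 1; omega

lemma seg_append (a : List Int) (i j : Nat) (hij : i ≤ j) (hj : j < a.length) :
    pvSeg a i j ++ [a.getD j 0] = pvSeg a i (j+1) := by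
  unfold pvSeg
  rw [List.take_add_one, List.drop_append_of_le_length (by simp; omega)]
  simp [List.getD_eq_getElem?_getD, List.getElem?_eq_getElem hj]

lemma seg_drop (a : List Int) (i j k : Nat) : (pvSeg a i j).drop k = pvSeg a (i+k) j := by
  unfold pvSeg
  rw [List.drop_drop]
  try congr 1
  try omega

lemma seg_ne_nil (a : List Int) (i j : Nat) (hij : i < j) (hj : j ≤ a.length) :
    pvSeg a i j ≠ [] := by
  intro h
  have := seg_len a i j hj
  rw [h] at this; simp at this; omega

lemma pvSign_eq_zero (d : Int) : pvSign d = 0 ↔ d = 0 := by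
  unfold pvSign; split_ifs <;> simp <;> omega

lemma pvSign_ne_iff (p q : Int) (hp : p ≠ 0) (hq : q ≠ 0) :
    (pvSign p ≠ pvSign q ↔ p * q < 0) := by
  unfold pvSign
  rcases lt_trichotomy p 0 with h|h|h <;> rcases lt_trichotomy q 0 with h'|h'|h' <;> simp_all <;>
    first
      | omega
      | nlinarith
      | (constructor <;> intro hx <;> first | omega | nlinarith)

lemma sgnFn_zero_iff (a : List Int) (t : Nat) (ht : 1 ≤ t) :
    sgnFn a (t-1) = 0 ↔ a.getD t 0 = a.getD (t-1) 0 := by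
  unfold sgnFn
  rw [show t - 1 + 1 = t by omega, pvSign_eq_zero]
  omega

lemma sgn_get (a : List Int) (k : Nat) (hk : k < a.length - 1) :
    (PySem.List.pyGet? (sgnList a) (k : Int)).getD 0 = sgnFn a k := by
  simp [sgnList, hk]

lemma pvRsB_le (a : List Int) (t rs : Nat) (hrs : rs < t) : pvRsB a t rs ≤ t := by
  unfold pvRsB; split_ifs <;> omega

lemma stepB_spec (a : List Int) (t bs bl rs : Nat) (h1 : 1 ≤ t) (ht : t < a.length) (hrs : rs < t) :
    pvStepB (sgnList a) ((bs : Int), (bl : Int), (rs : Int)) ((t : Int) - 1) =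
      (if bl < t + 1 - pvRsB a t rs
       then ((pvRsB a t rs : Int), ((t + 1 - pvRsB a t rs : Nat) : Int), (pvRsB a t rs : Int))
       else ((bs : Int), (bl : Int), (pvRsB a t rs : Int))) := by
  unfold pvStepB
  have hk : (t : Int) - 1 = ((t - 1 : Nat) : Int) := by omega
  have hget : (PySem.List.pyGet? (sgnList a) ((t : Int) - 1)).getD 0 = sgnFn a (t-1) := by
    rw [hk, sgn_get a (t-1) (by omega)]
  have hRS : pvRsB a t rs ≤ t := pvRsB_le a t rs hrs
  simp only [hget]
  have hrs' : (if sgnFn a (t-1) = 0 then (t : Int) - 1 + 1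
      else if ¬ ((rs : Int) = (t : Int) - 1 ∨ sgnFn a (t-1) ≠ (PySem.List.pyGet? (sgnList a) ((t : Int) - 1 - 1)).getD 0) then (t : Int) - 1
      else (rs : Int)) = ((pvRsB a t rs : Nat) : Int) := by
    unfold pvRsB
    by_cases h0 : sgnFn a (t-1) = 0
    · simp only [h0, if_true]; omega
    · rw [if_neg h0, if_neg h0]
      by_cases hrt : rs = t - 1
      · have hc : (rs : Int) = (t : Int) - 1 := by omega
        rw [if_neg (by simp [hc]), if_pos (Or.inl hrt)]
      · have ht2 : 2 ≤ t := by omega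
        have hk2 : (t : Int) - 1 - 1 = ((t - 2 : Nat) : Int) := by omega
        rw [hk2, sgn_get a (t-2) (by omega)]
        have hne : ¬ (rs : Int) = (t : Int) - 1 := by omega
        by_cases hd : sgnFn a (t-1) ≠ sgnFn a (t-2)
        · rw [if_neg (by simp [hne, hd]), if_pos (Or.inr hd)]
        · rw [if_pos (by simp [hne, hd]), if_neg (by simp [hrt, hd])]; omega
  simp only [hrs']
  have hcur : (t : Int) - 1 + 2 - ((pvRsB a t rs : Nat) : Int) = ((t + 1 - pvRsB a t rs : Nat) : Int) := by
    omega
  rw [hcur]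
  split_ifs with c1 c2 c3 <;> first | rfl | omega

lemma stepA_spec (a : List Int) (t : Nat) (l s : List Int) (bs bl rs : Nat)
    (ht : t < a.length) (hinv : pvInv a t l s bs bl rs) :
    pvStepA (l, s) (a.getD t 0) =
      (if bl < t + 1 - pvRsB a t rs
       then (pvSeg a (pvRsB a t rs) (t+1), pvSeg a (pvRsB a t rs) (t+1))
       else (pvSeg a (pvRsB a t rs) (t+1), s)) ∧
    pvInv a (t+1) (pvSeg a (pvRsB a t rs) (t+1))
      (if bl < t + 1 - pvRsB a t rs then pvSeg a (pvRsB a t rs) (t+1) else s)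
      (if bl < t + 1 - pvRsB a t rs then pvRsB a t rs else bs)
      (if bl < t + 1 - pvRsB a t rs then t + 1 - pvRsB a t rs else bl)
      (pvRsB a t rs) := by
  obtain ⟨hrs, htl, hbl, hbst, htr, hl, hs, hnz⟩ := hinv
  have h1 : 1 ≤ t := by omega
  have hllen : l.length = t - rs := by rw [hl]; exact seg_len a rs t (by omega)
  have hslen : s.length = bl := by rw [hs]; rw [seg_len a bs (bs+bl) (by omega)]; omega
  have hlast : pvLast l = a.getD (t-1) 0 := by rw [hl]; exact seg_last a rs t hrs (by omega)
  have hlnil : l ≠ [] := by rw [hl]; exact seg_ne_nil a rs t hrs (by omega)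
  by_cases h0 : sgnFn a (t-1) = 0
  · -- a[t] = a[t-1]: A resets to [v], B restarts the window at t; no best update (bl ≥ 1)
    have hv : a.getD t 0 = pvLast l := by rw [hlast]; exact (sgnFn_zero_iff a t h1).mp h0
    have hRSv : pvRsB a t rs = t := by unfold pvRsB; rw [if_pos h0]
    have hnew : [a.getD t 0] = pvSeg a t (t+1) := by
      rw [← seg_append a t t (le_refl t) ht]
      have hemp : pvSeg a t t = [] := by
        have := seg_len a t t (by omega)
        exact List.eq_nil_of_length_eq_zero (by omega)
      rw [hemp]; rfl
    have hc : ¬ (bl < t + 1 - t) := by omega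
    have hGfalse : ¬ (l = [] ∨ (a.getD t 0 ≠ pvLast l ∧
        (l.length = 1 ∨ (pvLast l - pvLast2 l) * (pvLast l - a.getD t 0) > 0))) := by
      push_neg
      exact ⟨hlnil, fun h => absurd hv h⟩
    have hveq : ¬ (a.getD t 0 ≠ pvLast l) := not_not_intro hv
    simp only [hRSv, if_neg hc]
    have hlen1 : ¬ ((pvSeg a t (t+1)).length > s.length) := by
      simp only [gt_iff_lt]; rw [seg_len a t (t+1) (by omega), hslen]; omega
    constructor
    · simp only [pvStepA]
      rw [if_neg hGfalse, if_neg hveq]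
      simp only [hnew]
      rw [if_neg hlen1]
    · refine ⟨by omega, by omega, hbl, by omega, by omega, rfl, hs, ?_⟩
      intro i hi hi1; omega
  · -- a[t] ≠ a[t-1]
    have hv : a.getD t 0 ≠ pvLast l := by
      rw [hlast]; exact fun h => h0 ((sgnFn_zero_iff a t h1).mpr h)
    by_cases hext : rs = t - 1 ∨ sgnFn a (t-1) ≠ sgnFn a (t-2)
    · -- extend: A appends, B keeps run_start
      have hRSv : pvRsB a t rs = rs := by unfold pvRsB; rw [if_neg h0, if_pos hext]
      have hG : l = [] ∨ (a.getD t 0 ≠ pvLast l ∧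
          (l.length = 1 ∨ (pvLast l - pvLast2 l) * (pvLast l - a.getD t 0) > 0)) := by
        refine Or.inr ⟨hv, ?_⟩
        by_cases hrt : rs = t - 1
        · exact Or.inl (by omega)
        · refine Or.inr ?_
          have hd := hext.resolve_left hrt
          have ht2 : rs + 2 ≤ t := by omega
          have hlast2 : pvLast2 l = a.getD (t-2) 0 := by
            rw [hl]; exact seg_last2 a rs t ht2 (by omega)
          have hp : a.getD (t-1) 0 - a.getD (t-2) 0 ≠ 0 := by
            have := hnz (t-2) (by omega) (by omega)
            unfold sgnFn at this
            rw [show t - 2 + 1 = t - 1 by omega] at this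
            exact fun h => this (by rw [pvSign_eq_zero]; omega)
          have hq : a.getD t 0 - a.getD (t-1) 0 ≠ 0 := by
            intro h; exact h0 ((sgnFn_zero_iff a t h1).mpr (by omega))
          have hd' : pvSign (a.getD (t-1) 0 - a.getD (t-2) 0) ≠ pvSign (a.getD t 0 - a.getD (t-1) 0) := by
            unfold sgnFn at hd
            rw [show t - 1 + 1 = t by omega, show t - 2 + 1 = t - 1 by omega] at hd
            exact fun h => hd (by rw [h])
          have hpq : (a.getD (t-1) 0 - a.getD (t-2) 0) * (a.getD t 0 - a.getD (t-1) 0) < 0 :=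
            (pvSign_ne_iff _ _ hp hq).mp hd'
          rw [hlast, hlast2]; nlinarith
      have happ : l ++ [a.getD t 0] = pvSeg a rs (t+1) := by
        rw [hl]; exact seg_append a rs t (by omega) ht
      have hnz' : ∀ i : Nat, rs ≤ i → i + 1 < t + 1 → sgnFn a i ≠ 0 := by
        intro i hi hi1
        rcases Nat.lt_or_ge (i+1) t with h | h
        · exact hnz i hi h
        · rw [show i = t - 1 by omega]; exact h0
      have hlen' : (pvSeg a rs (t+1)).length = t + 1 - rs := seg_len a rs (t+1) (by omega)
      by_cases hcond : bl < t + 1 - rs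
      · simp only [hRSv, if_pos hcond]
        constructor
        · simp only [pvStepA]
          rw [if_pos hG]
          by_cases hsl : s = l
          · rw [if_pos hsl]
            simp only [happ]
            rw [if_neg (by simp)]
          · rw [if_neg hsl]
            simp only [happ]
            rw [if_pos (by simp only [gt_iff_lt]; rw [hlen', hslen]; omega)]
        · refine ⟨by omega, by omega, by omega, by omega, by omega, rfl, ?_, hnz'⟩
          congr 1; omega
      · simp only [hRSv, if_neg hcond]
        have hsl : s ≠ l := by
          intro h
          have : bl = t - rs := by rw [← hslen, ← hllen, h]
          omega
        constructor
        · simp only [pvStepA]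
          rw [if_pos hG, if_neg hsl]
          simp only [happ]
          rw [if_neg (by simp only [gt_iff_lt]; rw [hlen', hslen]; omega)]
        · exact ⟨by omega, by omega, hbl, by omega, by omega, rfl, hs, hnz'⟩
    · -- restart at [a[t-1], a[t]]: A keeps only the last element, B restarts at t-1
      push_neg at hext
      obtain ⟨hrt, hd⟩ := hext
      have hrt2 : rs + 2 ≤ t := by omega
      have hRSv : pvRsB a t rs = t - 1 := by
        unfold pvRsB; rw [if_neg h0, if_neg (by simp [hrt, hd])]
      have hG : ¬ (l = [] ∨ (a.getD t 0 ≠ pvLast l ∧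
          (l.length = 1 ∨ (pvLast l - pvLast2 l) * (pvLast l - a.getD t 0) > 0))) := by
        push_neg
        refine ⟨hlnil, fun _ => ⟨by omega, ?_⟩⟩
        have hlast2 : pvLast2 l = a.getD (t-2) 0 := by
          rw [hl]; exact seg_last2 a rs t hrt2 (by omega)
        have hp : a.getD (t-1) 0 - a.getD (t-2) 0 ≠ 0 := by
          have := hnz (t-2) (by omega) (by omega)
          unfold sgnFn at this
          rw [show t - 2 + 1 = t - 1 by omega] at this
          exact fun h => this (by rw [pvSign_eq_zero]; omega)
        have hq : a.getD t 0 - a.getD (t-1) 0 ≠ 0 := by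
          intro h; exact h0 ((sgnFn_zero_iff a t h1).mpr (by omega))
        have hsame : pvSign (a.getD (t-1) 0 - a.getD (t-2) 0) = pvSign (a.getD t 0 - a.getD (t-1) 0) := by
          unfold sgnFn at hd
          rw [show t - 1 + 1 = t by omega, show t - 2 + 1 = t - 1 by omega] at hd
          omega
        have hnlt : ¬ ((a.getD (t-1) 0 - a.getD (t-2) 0) * (a.getD t 0 - a.getD (t-1) 0) < 0) :=
          fun hc => ((pvSign_ne_iff _ _ hp hq).mpr hc) hsame
        rw [hlast, hlast2]
        push_neg at hnlt
        nlinarith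
      have hnew : PySem.List.slice l (some (-1)) none ++ [a.getD t 0] = pvSeg a (t-1) (t+1) := by
        rw [PySem.List.slice_from_neg_one, hllen, hl, seg_drop]
        rw [show rs + (t - rs - 1) = t - 1 by omega]
        exact seg_append a (t-1) t (by omega) ht
      have hnz' : ∀ i : Nat, t - 1 ≤ i → i + 1 < t + 1 → sgnFn a i ≠ 0 := by
        intro i hi hi1; rw [show i = t - 1 by omega]; exact h0
      have hlen' : (pvSeg a (t-1) (t+1)).length = 2 := by
        rw [seg_len a (t-1) (t+1) (by omega)]; omega
      by_cases hcond : bl < t + 1 - (t - 1)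
      · simp only [hRSv, if_pos hcond]
        constructor
        · simp only [pvStepA]
          rw [if_neg hG, if_pos hv]
          simp only [hnew]
          rw [if_pos (by simp only [gt_iff_lt]; rw [hlen', hslen]; omega)]
        · refine ⟨by omega, by omega, by omega, by omega, by omega, rfl, ?_, hnz'⟩
          congr 1; omega
      · simp only [hRSv, if_neg hcond]
        constructor
        · simp only [pvStepA]
          rw [if_neg hG, if_pos hv]
          simp only [hnew]
          rw [if_neg (by simp only [gt_iff_lt]; rw [hlen', hslen]; omega)]
        · exact ⟨by omega, by omega, hbl, by omega, by omega, rfl, hs, hnz'⟩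

lemma pvMain : ∀ (m : Nat) (a : List Int) (t : Nat) (l s : List Int) (bs bl rs : Nat),
    t + m = a.length → pvInv a t l s bs bl rs →
    ((a.drop t).foldl pvStepA (l, s)).2 =
      (fun st : Int × Int × Int => PySem.List.slice a (some st.1) (some (st.1 + st.2.1)))
        ((PySem.List.pyRange ((t : Int) - 1) ((a.length : Int) - 1) 1).foldl
          (pvStepB (sgnList a)) ((bs : Int), (bl : Int), (rs : Int))) := by
  intro m
  induction m with
  | zero =>
    intro a t l s bs bl rs hm hinv
    obtain ⟨hrs, htl, hbl, hbst, htr, hl, hs, hnz⟩ := hinv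
    have ht : t = a.length := by omega
    rw [List.drop_of_length_le (by omega)]
    rw [show ((t : Int) - 1) = ((a.length : Int) - 1) by omega]
    simp only [PySem.List.pyRange_one, sub_self, Int.toNat_zero, List.range_zero, List.map_nil,
      List.foldl_nil]
    rw [hs, PySem.List.slice_natCast_add]
    simp [pvSeg, List.drop_take]
  | succ m ih =>
    intro a t l s bs bl rs hm hinv
    have hrs := hinv.1
    have ht : t < a.length := by omega
    have h1 : 1 ≤ t := by omega
    rw [List.drop_eq_getElem_cons ht, PySem.List.pyRange_one_cons (by omega)]
    simp only [List.foldl_cons]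
    rw [show a[t] = a.getD t 0 from (List.getD_eq_getElem a 0 ht).symm]
    obtain ⟨hA, hinv'⟩ := stepA_spec a t l s bs bl rs ht hinv
    rw [hA, stepB_spec a t bs bl rs h1 ht hrs]
    rw [show (t : Int) - 1 + 1 = ((t + 1 : Nat) : Int) - 1 by omega]
    by_cases hcond : bl < t + 1 - pvRsB a t rs
    · rw [if_pos hcond, if_pos hcond]
      have := ih a (t+1) _ _ _ _ _ (by omega) (by simpa [hcond] using hinv')
      simpa [hcond] using this
    · rw [if_neg hcond, if_neg hcond]
      have := ih a (t+1) _ _ _ _ _ (by omega) (by simpa [hcond] using hinv')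
      simpa [hcond] using this

lemma sgn_build (a : List Int) :
    (PySem.List.pyRange 0 ((a.length : Int) - 1) 1).foldl
      (fun acc i =>
        acc ++ [pvSign ((PySem.List.pyGet? a (i + 1)).getD 0 - (PySem.List.pyGet? a i).getD 0)]) []
    = sgnList a := by
  rw [PySem.List.foldl_append_singleton_eq_map, PySem.List.pyRange_one, List.map_map]
  unfold sgnList
  rw [show ((a.length : Int) - 1 - 0).toNat = a.length - 1 by omega]
  apply List.map_congr_left
  intro k hk
  simp only [Function.comp_apply, sgnFn]
  rw [show (0 : Int) + (k : Int) + 1 = ((k+1 : Nat) : Int) by omega,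
      show (0 : Int) + (k : Int) = ((k : Nat) : Int) by omega]
  simp only [PySem.List.pyGet?_natCast, List.getD_eq_getElem?_getD]

lemma alt_eq (a : List Int) (h : 2 ≤ a.length) :
    longest_bouncy_list_alt a =
      (fun st : Int × Int × Int => PySem.List.slice a (some st.1) (some (st.1 + st.2.1)))
        ((PySem.List.pyRange 0 ((a.length : Int) - 1) 1).foldl (pvStepB (sgnList a)) (0, 1, 0)) := by
  unfold longest_bouncy_list_alt
  simp only [PySem.List.len_eq]
  rw [if_neg (by omega), sgn_build]

-- ===== VERDICT (by name: the statement is the Claim_ definition above) =====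
theorem longest_bouncy_list_spec : Claim_equal_longest_bouncy_list := by
  intro arr _
  unfold Spec_longest_bouncy_list
  rcases arr with _ | ⟨x, rest⟩
  · decide
  rcases rest with _ | ⟨y, rest'⟩
  · simp [longest_bouncy_list, longest_bouncy_list_alt, pvStepA, pvLast, PySem.List.len_eq,
      PySem.List.slice_none_none]
  set a := x :: y :: rest' with ha
  have hlen : 2 ≤ a.length := by simp [ha]
  rw [alt_eq a hlen]
  have hfirst : pvStepA ([], []) x = ([x], [x]) := by
    simp [pvStepA]
  have hinit : pvInv a 1 [x] [x] 0 1 0 := by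
    refine ⟨by omega, by omega, le_refl 1, by omega, by omega, ?_, ?_, ?_⟩
    · simp [pvSeg, ha]
    · simp [pvSeg, ha]
    · intro i hi hi1; omega
  have := pvMain (a.length - 1) a 1 [x] [x] 0 1 0 (by omega) hinit
  unfold longest_bouncy_list
  rw [ha]
  rw [show (x :: y :: rest' : List Int).foldl pvStepA ([], []) =
      ((x :: y :: rest').drop 1).foldl pvStepA ([x], [x]) by
    simp [List.foldl_cons, hfirst]]
  rw [← ha] at *
  rw [this]
  norm_num
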